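-- pv_equiv track=rewrite | github.com/elizajae/python-ds-practice | fs_1_is_odd_string/is_odd_string.py | is_odd_string
-- ===== SOURCE A (Python) =====
-- def is_odd_string(word):
--     """Is the sum of the character-positions odd?
--
--     Word is a simple word of uppercase/lowercase letters without punctuation.
--
--     For each character, find it's "character position" ("a"=1, "b"=2, etc).
--     Return True/False, depending on whether sum of those numbers is odd.
--
--     For example, these sum to 1, which is odd:
--
--         >>> is_odd_string('a')
--         True
--
--         >>> is_odd_string('A')
--         True
--
--     These sum to 4, which is not odd:
--
--         >>> is_odd_string('aaaa')
--         False
--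
--         >>> is_odd_string('AAaa')
--         False
--
--     Longer example:
--
--         >>> is_odd_string('amazing')
--         True
--     """
--     # START SOLUTION
--
--     # We could do this with a loop, but it's easier to use a list comprehension
--     # to get a list of character positions, then sum that list.
--
--     # We'll use ord() to get the character position of each letter. We'll
--     # need to convert the letter to lowercase first, since ord() gives us
--     # different values for uppercase and lowercase letters.
--
--     # We'll use a generator expression to convert each letter to its
--     # character position, then pass that to sum() to get the total.
--
--     # We'll use % to see if the total is odd or even.
--
--     total = 0
--
--     for char in word:
--         if char.islower():
--             total += ord(char) - ord('a') + 1
--         else: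
--             total += ord(char) - ord('A') + 1
--
--     return total % 2 == 1
-- ===== SOURCE B (Python) =====
-- def is_odd_string(word):
--     # Different strategy: instead of accumulating per-character positions in one
--     # pass over the word, build the set of distinct characters once, then count
--     # the occurrences of each distinct odd-position character with str.count and
--     # test the parity of that total (even-position characters cannot affect the
--     # parity, and both case base offsets are odd, so a position is odd iff ord(c) is odd).
--     return sum(word.count(c) for c in set(word) if ord(c) % 2 == 1) % 2 == 1
-- ===== Notes on version B (the rewrite author's own statement) =====
-- stated objective: alternative
-- what changed: Replaces A's single branching pass that accumulates each character's alphabet position by a set-then-count strategy: build the set of distinct characters once, run one str.count scan per distinct odd-code character, and test the parity of that total (even-code characters cannot change the parity).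
import Mathlib
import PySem

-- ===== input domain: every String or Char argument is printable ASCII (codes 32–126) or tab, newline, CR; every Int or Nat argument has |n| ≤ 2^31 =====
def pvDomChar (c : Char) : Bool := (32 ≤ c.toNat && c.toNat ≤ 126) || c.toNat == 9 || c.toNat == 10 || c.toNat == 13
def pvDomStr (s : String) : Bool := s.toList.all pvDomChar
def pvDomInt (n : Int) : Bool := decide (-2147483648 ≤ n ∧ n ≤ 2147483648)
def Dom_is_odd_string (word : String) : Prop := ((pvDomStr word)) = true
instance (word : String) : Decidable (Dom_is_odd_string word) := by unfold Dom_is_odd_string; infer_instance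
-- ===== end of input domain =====

-- B builds the set of distinct characters once and sums one str.count per distinct odd-code character
-- instead of A's single branching positional-sum pass (alternative decomposition; same O(n) up to the alphabet factor).

-- ===== PORT A =====
def is_odd_string (word : String) : Bool :=
  let total : Int := word.toList.foldl (fun total char =>
    if PySem.Chars.islower char then
      total + ((char.toNat : Int) - ('a'.toNat : Int) + 1)
    else
      total + ((char.toNat : Int) - ('A'.toNat : Int) + 1)) 0
  PySem.Int.mod total 2 == 1

-- ===== PORT B =====
def is_odd_string_alt (word : String) : Bool :=
  let total : Int :=
    (((PySem.Set.ofList word.toList).filter (fun c => c.toNat % 2 == 1)).map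
      (fun c => (PySem.List.count word.toList c : Int))).sum
  PySem.Int.mod total 2 == 1

-- ===== PRECONDITION & SPEC =====
def Spec_is_odd_string (word : String) (out : Bool) : Prop := out = is_odd_string_alt word
instance (word : String) (out : Bool) : Decidable (Spec_is_odd_string word out) := by unfold Spec_is_odd_string; infer_instance

-- ===== CLAIM (what is proved, stated in full; the proofs are below) =====
def Claim_equal_is_odd_string : Prop := ∀ (word : String), Dom_is_odd_string word → Spec_is_odd_string word (is_odd_string word)

-- ===== LEMMAS AND PROOFS =====

-- A's running total keeps the parity of the number of odd-code characters seen so far.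
theorem pv_sum_parity (l : List Char) (t : Int) :
    PySem.Int.mod (l.foldl (fun total char =>
      if PySem.Chars.islower char then
        total + ((char.toNat : Int) - ('a'.toNat : Int) + 1)
      else
        total + ((char.toNat : Int) - ('A'.toNat : Int) + 1)) t) 2
    = PySem.Int.mod (t + (l.countP (fun c => c.toNat % 2 == 1) : Int)) 2 := by
  induction l generalizing t with
  | nil => simp
  | cons c rest ih =>
    simp only [List.foldl_cons, List.countP_cons]
    rw [ih]
    have h2 : (0:Int) < 2 := by norm_num
    rw [PySem.Int.mod_eq_emod_of_pos h2, PySem.Int.mod_eq_emod_of_pos h2]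
    have ha : ('a'.toNat : Int) = 97 := by decide
    have hA : ('A'.toNat : Int) = 65 := by decide
    have hc : ((c.toNat : Int)) % 2 = ((c.toNat % 2 : Nat) : Int) :=
      (Int.natCast_mod c.toNat 2).symm
    rcases Nat.mod_two_eq_zero_or_one c.toNat with h1 | h1 <;>
      rw [h1] at hc <;> split_ifs with hL hB hB <;> simp only [ha, hA] <;>
      simp only [beq_iff_eq] at hB <;> omega

-- PySem's first-occurrence dedup is a permutation of Mathlib's dedup.
theorem pv_dedup_perm (l : List Char) : (PySem.List.dedup l).Perm l.dedup := by
  apply (List.perm_ext_iff_of_nodup (PySem.List.nodup_dedup l) l.nodup_dedup).mpr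
  intro a
  rw [PySem.List.mem_dedup, List.mem_dedup]

-- Casting a sum of Nat counts to Int commutes with the map.
theorem pv_cast_sum (s : List Char) (f : Char → Nat) :
    (s.map (fun c => ((f c : Nat) : Int))).sum = ((s.map f).sum : Int) := by
  induction s with
  | nil => simp
  | cons c rest ih => simp [ih]

-- B's total is the number of odd-code characters of the word.
theorem pv_alt_total (l : List Char) :
    ((((PySem.Set.ofList l).filter (fun c => c.toNat % 2 == 1)).map
      (fun c => (PySem.List.count l c : Int))).sum)
    = (l.countP (fun c => c.toNat % 2 == 1) : Int) := by
  have hperm : ((PySem.Set.ofList l).filter (fun c => c.toNat % 2 == 1)).Perm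
      (l.dedup.filter (fun c => c.toNat % 2 == 1)) := by
    rw [← PySem.List.dedup_eq_ofList]
    exact (pv_dedup_perm l).filter _
  have hsum := (hperm.map (fun c => (PySem.List.count l c : Int))).sum_eq
  rw [hsum]
  have : ((l.dedup.filter (fun c => c.toNat % 2 == 1)).map l.count).sum
      = l.countP (fun c => c.toNat % 2 == 1) :=
    List.sum_map_count_dedup_filter_eq_countP _ l
  rw [pv_cast_sum _ (fun c => PySem.List.count l c)]
  simp only [PySem.List.count_eq]
  rw [this]

-- ===== VERDICT (by name: the statement is the Claim_ definition above) =====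
theorem is_odd_string_spec : Claim_equal_is_odd_string := by
  intro word _
  unfold Spec_is_odd_string is_odd_string is_odd_string_alt
  simp only []
  rw [pv_sum_parity word.toList 0, pv_alt_total word.toList]
  norm_num
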